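-- pv_equiv track=rewrite | github.com/holbizmetrics/prime-alphabet-finder | prime_encoder_extended.py | icelandic_number_word
-- ===== SOURCE A (Python) =====
-- def icelandic_number_word(n: int) -> str:
--     if n == 0: return "null"
--     ones = ["", "einn", "tveir", "thrir", "fjorir", "fimm", "sex", "sjo", "atta", "niu",
--             "tiu", "ellefu", "tolf", "threttan", "fjortan", "fimmtan", "sextan",
--             "sautjan", "atjan", "nitjan"]
--     tens = ["", "", "tuttugu", "thrjatiu", "fjorutil", "fimmtiu", "sextiu", "sjotiu", "attatiu", "niutiu"]
--     if n < 20: return ones[n]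
--     elif n < 100:
--         if n % 10 == 0: return tens[n // 10]
--         return tens[n // 10] + " og " + ones[n % 10]
--     elif n < 1000:
--         prefix = "eitt" if n // 100 == 1 else ones[n // 100]
--         return prefix + " hundrad" + (" " + icelandic_number_word(n % 100) if n % 100 else "")
--     return str(n)
-- ===== SOURCE B (Python) =====
-- def icelandic_number_word(n: int) -> str:
--     ones = ["", "einn", "tveir", "thrir", "fjorir", "fimm", "sex", "sjo", "atta", "niu",
--             "tiu", "ellefu", "tolf", "threttan", "fjortan", "fimmtan", "sextan",
--             "sautjan", "atjan", "nitjan"]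
--     if n == 0:
--         return "null"
--     if n < 20:
--         return ones[n]
--     if n >= 1000:
--         return str(n)
--     # build the whole word table 0..999 bottom-up, then index it
--     tens = ["", "", "tuttugu", "thrjatiu", "fjorutil", "fimmtiu", "sextiu", "sjotiu", "attatiu", "niutiu"]
--     words = ones + [tens[m // 10] + (" og " + ones[m % 10] if m % 10 else "")
--                     for m in range(20, 100)]
--     words = words + [("eitt" if m // 100 == 1 else ones[m // 100]) + " hundrad"
--                      + (" " + words[m % 100] if m % 100 else "")
--                      for m in range(100, 1000)]
--     return words[n]
-- ===== Notes on version B (the rewrite author's own statement) =====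
-- stated objective: alternative
-- what changed: B replaces A's recursive per-case analysis with bottom-up dynamic programming: it builds the complete word table for 0..999 with two comprehensions (tens rows, then hundreds rows reusing the already-built sub-100 entries) and answers by a single table index.
import Mathlib
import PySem

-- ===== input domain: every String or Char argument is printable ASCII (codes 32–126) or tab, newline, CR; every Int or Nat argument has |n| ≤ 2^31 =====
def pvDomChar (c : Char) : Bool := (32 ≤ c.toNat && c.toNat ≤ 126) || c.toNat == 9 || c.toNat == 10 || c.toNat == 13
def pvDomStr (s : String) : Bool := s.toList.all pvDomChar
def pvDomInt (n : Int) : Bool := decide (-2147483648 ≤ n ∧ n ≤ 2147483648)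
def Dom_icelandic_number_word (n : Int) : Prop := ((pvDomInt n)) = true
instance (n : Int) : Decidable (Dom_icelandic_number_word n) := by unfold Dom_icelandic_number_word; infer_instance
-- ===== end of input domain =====

-- B replaces A's recursive case analysis with bottom-up table building (DP): it fills the full word table 0..999 and answers by one index (objective: alternative, same cost).

-- ===== PORT A =====
def pvOnes : List String :=
  ["", "einn", "tveir", "thrir", "fjorir", "fimm", "sex", "sjo", "atta", "niu",
   "tiu", "ellefu", "tolf", "threttan", "fjortan", "fimmtan", "sextan",
   "sautjan", "atjan", "nitjan"]

def pvTens : List String :=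
  ["", "", "tuttugu", "thrjatiu", "fjorutil", "fimmtiu", "sextiu", "sjotiu", "attatiu", "niutiu"]

-- fuel makes A's self-recursion structural (the Python recursion depth here is at most 2);
-- the "" on fuel exhaustion is unreachable for fuel ≥ 2.
def icelandic_go (fuel : Nat) (n : Int) : String :=
  match fuel with
  | 0 => ""
  | fuel + 1 =>
    if n == 0 then "null"
    else if n < 20 then PySem.List.pyGetD pvOnes n ""      -- ones[n]; out of range = IndexError, excluded by Pre_
    else if n < 100 then
      if PySem.Int.mod n 10 == 0 then PySem.List.pyGetD pvTens (PySem.Int.floordiv n 10) ""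
      else PySem.List.pyGetD pvTens (PySem.Int.floordiv n 10) "" ++ " og " ++
           PySem.List.pyGetD pvOnes (PySem.Int.mod n 10) ""
    else if n < 1000 then
      (if PySem.Int.floordiv n 100 == 1 then "eitt"
       else PySem.List.pyGetD pvOnes (PySem.Int.floordiv n 100) "") ++ " hundrad" ++
      (if PySem.Int.mod n 100 != 0 then " " ++ icelandic_go fuel (PySem.Int.mod n 100) else "")
    else PySem.Int.toStr n

def icelandic_number_word (n : Int) : String := icelandic_go 2 n

-- ===== PORT B =====
-- the two comprehensions of Source B
def pvRow2 (m : Int) : String :=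
  PySem.List.pyGetD pvTens (PySem.Int.floordiv m 10) "" ++
  (if PySem.Int.mod m 10 != 0 then " og " ++ PySem.List.pyGetD pvOnes (PySem.Int.mod m 10) "" else "")

def pvRow3 (words : List String) (m : Int) : String :=
  (if PySem.Int.floordiv m 100 == 1 then "eitt"
   else PySem.List.pyGetD pvOnes (PySem.Int.floordiv m 100) "") ++ " hundrad" ++
  (if PySem.Int.mod m 100 != 0 then " " ++ PySem.List.pyGetD words (PySem.Int.mod m 100) "" else "")

def icelandic_number_word_alt (n : Int) : String :=
  if n == 0 then "null"
  else if n < 20 then PySem.List.pyGetD pvOnes n ""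
  else if n ≥ 1000 then PySem.Int.toStr n
  else
    let words := pvOnes ++ (PySem.List.pyRange 20 100 1).map pvRow2
    let words := words ++ (PySem.List.pyRange 100 1000 1).map (pvRow3 (pvOnes ++ (PySem.List.pyRange 20 100 1).map pvRow2))
    PySem.List.pyGetD words n ""

-- ===== PRECONDITION & SPEC =====
-- A raises IndexError (ones[n] with index below -20) exactly when n < -20; Pre_ excludes those inputs (B raises there too).
def Pre_icelandic_number_word (n : Int) : Prop := -20 ≤ n
instance (n : Int) : Decidable (Pre_icelandic_number_word n) := by unfold Pre_icelandic_number_word; infer_instance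
def pvWitness_icelandic_number_word : Int := (137)

def Spec_icelandic_number_word (n : Int) (out : String) : Prop := out = icelandic_number_word_alt n
instance (n : Int) (out : String) : Decidable (Spec_icelandic_number_word n out) := by unfold Spec_icelandic_number_word; infer_instance

-- ===== CLAIM =====
def Claim_equal_icelandic_number_word : Prop := ∀ (n : Int), Dom_icelandic_number_word n → Pre_icelandic_number_word n → Spec_icelandic_number_word n (icelandic_number_word n)

-- ===== LEMMAS AND PROOFS =====

-- B's sub-1000 table, named for the proofs (same term as the lets in the port)
def pvWords1 : List String := pvOnes ++ (PySem.List.pyRange 20 100 1).map pvRow2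
def pvWords : List String := pvWords1 ++ (PySem.List.pyRange 100 1000 1).map (pvRow3 pvWords1)

theorem pvWords1_len : pvWords1.length = 100 := by decide
theorem pvWords_len : pvWords.length = 1000 := by
  simp [pvWords, pvWords1_len, PySem.List.length_pyRange_one]

-- table entry 20..99 is the tens-row string
theorem pvWords1_get (n : Int) (h20 : 20 ≤ n) (h100 : n < 100) :
    PySem.List.pyGetD pvWords1 n "" = pvRow2 n := by
  rw [PySem.List.pyGetD_eq_getElem pvWords1 "" (by omega) (by rw [pvWords1_len]; omega)]
  have hlen : pvOnes.length = 20 := by decide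
  simp only [pvWords1]
  rw [List.getElem_append_right (by simp [hlen]; omega)]
  rw [List.getElem_map, PySem.List.getElem_pyRange_one]
  congr 1
  simp [hlen]; omega

-- table entry 1..99 equals A's recursive sub-call (fuel 1 suffices there)
theorem pvWords1_sub (r : Int) (h1 : 1 ≤ r) (h100 : r < 100) :
    PySem.List.pyGetD pvWords1 r "" = icelandic_go 1 r := by
  by_cases hr20 : r < 20
  · rw [PySem.List.pyGetD_eq_getElem pvWords1 "" (by omega) (by rw [pvWords1_len]; omega)]
    have hlen : pvOnes.length = 20 := by decide
    simp only [pvWords1]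
    rw [List.getElem_append_left (by simp [hlen]; omega)]
    rw [icelandic_go]
    have h0 : ¬ (r == 0) := by simp; omega
    simp only [h0, if_false, hr20, if_true, Bool.false_eq_true]
    rw [PySem.List.pyGetD_eq_getElem pvOnes "" (by omega) (by rw [hlen]; omega)]
  · rw [pvWords1_get r (by omega) h100, icelandic_go, pvRow2]
    have h0 : ¬ (r == 0) := by simp; omega
    simp only [h0, Bool.false_eq_true, if_false, hr20, h100, if_true]
    by_cases hd : (10 : Int) ∣ r
    · simp [hd]
    · simp [hd, String.append_assoc]

-- table entry 100..999 is the hundreds-row string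
theorem pvWords_get_hi (n : Int) (h100 : 100 ≤ n) (h1000 : n < 1000) :
    PySem.List.pyGetD pvWords n "" = pvRow3 pvWords1 n := by
  rw [PySem.List.pyGetD_eq_getElem pvWords "" (by omega) (by rw [pvWords_len]; omega)]
  simp only [pvWords]
  rw [List.getElem_append_right (by rw [pvWords1_len]; omega)]
  rw [List.getElem_map, PySem.List.getElem_pyRange_one]
  congr 1
  rw [pvWords1_len]; omega

-- ===== VERDICT =====
theorem icelandic_number_word_spec : Claim_equal_icelandic_number_word := by
  intro n _ hpre
  unfold Spec_icelandic_number_word icelandic_number_word icelandic_number_word_alt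
  by_cases h0 : n == 0
  · simp [icelandic_go, h0]
  by_cases h20 : n < 20
  · simp [icelandic_go, h0, h20]
  by_cases h1000 : n ≥ 1000
  · simp [icelandic_go, h0, h20, h1000, show ¬ n < 100 by omega, show ¬ n < 1000 by omega]
  simp only [h0, Bool.false_eq_true, if_false, h20, h1000]
  have hW : (pvOnes ++ (PySem.List.pyRange 20 100 1).map pvRow2) = pvWords1 := rfl
  rw [hW]
  have hW2 : (pvWords1 ++ (PySem.List.pyRange 100 1000 1).map (pvRow3 pvWords1)) = pvWords := rfl
  simp only [hW2]
  by_cases h100 : n < 100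
  · -- A's tens branch vs table entry
    rw [icelandic_go]
    simp only [h0, Bool.false_eq_true, if_false, h20, if_true, h100]
    rw [show PySem.List.pyGetD pvWords n "" = PySem.List.pyGetD pvWords1 n "" from by
      rw [PySem.List.pyGetD_eq_getElem pvWords "" (by omega) (by rw [pvWords_len]; omega),
          PySem.List.pyGetD_eq_getElem pvWords1 "" (by omega) (by rw [pvWords1_len]; omega),
          ]
      simp only [pvWords]
      rw [List.getElem_append_left (by rw [pvWords1_len]; omega)]]
    rw [pvWords1_get n (by omega) h100, pvRow2]
    by_cases hd : (10 : Int) ∣ n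
    · simp [hd]
    · simp [hd, String.append_assoc]
  · -- A's hundreds branch vs table entry
    rw [pvWords_get_hi n (by omega) (by omega), icelandic_go]
    simp only [h0, Bool.false_eq_true, if_false, h20, h100, show n < 1000 from by omega, if_true]
    rw [pvRow3]
    by_cases hd : (100 : Int) ∣ n
    · simp [hd]
    · have hmn : PySem.Int.mod n 100 ≠ 0 := by
        rw [Ne, PySem.Int.mod_eq_zero_iff_dvd]; exact hd
      rw [pvWords1_sub _ (by have h := PySem.Int.mod_nonneg n (b := 100) (by omega); omega)
            (PySem.Int.mod_lt n (by omega))]
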